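-- pv_equiv track=rewrite | github.com/mati1mati1/rsa-encryption-breaker | q1.py | plaintext_score
-- ===== SOURCE A (Python) =====
-- import string
--
-- def plaintext_score(plaintext: str) -> float:
--     """Scores a candidate plaintext string, higher means more likely."""
--     # Please don't return complex numbers, that would be just annoying.
--     # TODO: IMPLEMENT THIS FUNCTION
--     score = 0
--     for char in plaintext:
--         if char == ' ':
--             score += 10
--         elif char in string.ascii_letters:
--             score += 3
--         elif char in string.digits:
--             score += 1
--     return score
-- ===== SOURCE B (Python) =====
-- import string
--
-- def plaintext_score(plaintext: str) -> float:
--     """Scores a candidate plaintext string, higher means more likely."""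
--     counts = {}
--     for ch in plaintext:
--         counts[ch] = counts.get(ch, 0) + 1
--     score = 0
--     for ch, n in counts.items():
--         if ch == ' ':
--             score += 10 * n
--         elif ch in string.ascii_letters:
--             score += 3 * n
--         elif ch in string.digits:
--             score += 1 * n
--     return score
-- ===== Notes on version B (the rewrite author's own statement) =====
-- stated objective: alternative
-- what changed: B first builds a frequency dictionary of the plaintext in one pass, then scores each DISTINCT character once and multiplies its category weight by its count, instead of testing category membership for every character occurrence.
import Mathlib
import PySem

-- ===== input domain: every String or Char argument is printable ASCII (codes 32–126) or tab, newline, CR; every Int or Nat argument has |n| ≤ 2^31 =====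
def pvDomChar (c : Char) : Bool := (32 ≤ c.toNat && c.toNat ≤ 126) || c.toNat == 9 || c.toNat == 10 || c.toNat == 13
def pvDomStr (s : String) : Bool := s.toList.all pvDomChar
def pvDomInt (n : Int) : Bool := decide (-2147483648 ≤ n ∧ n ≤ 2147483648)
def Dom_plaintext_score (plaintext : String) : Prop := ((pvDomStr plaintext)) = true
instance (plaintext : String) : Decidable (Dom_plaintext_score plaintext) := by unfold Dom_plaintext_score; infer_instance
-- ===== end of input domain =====

-- B scores each distinct character once via a frequency dictionary (weight × count) instead of testing category membership per occurrence; same result, alternative structure.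


-- string.ascii_letters and string.digits as character lists
def pvAsciiLetters : List Char := "abcdefghijklmnopqrstuvwxyzABCDEFGHIJKLMNOPQRSTUVWXYZ".toList
def pvDigits : List Char := "0123456789".toList

-- ===== PORT A =====
def plaintext_score (plaintext : String) : Int :=
  plaintext.toList.foldl
    (fun score char =>
      if char = ' ' then score + 10
      else if pvAsciiLetters.contains char then score + 3
      else if pvDigits.contains char then score + 1
      else score) 0

-- ===== PORT B =====
def plaintext_score_alt (plaintext : String) : Int :=
  let counts : PySem.Dict Char Int :=
    plaintext.toList.foldl (fun d ch => d.insert ch (d.getD ch 0 + 1)) PySem.Dict.empty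
  counts.items.foldl
    (fun score p =>
      if p.1 = ' ' then score + 10 * p.2
      else if pvAsciiLetters.contains p.1 then score + 3 * p.2
      else if pvDigits.contains p.1 then score + 1 * p.2
      else score) 0

-- ===== PRECONDITION & SPEC =====
def Spec_plaintext_score (plaintext : String) (out : Int) : Prop := out = plaintext_score_alt plaintext
instance (plaintext : String) (out : Int) : Decidable (Spec_plaintext_score plaintext out) := by unfold Spec_plaintext_score; infer_instance

-- ===== CLAIM (what is proved, stated in full; the proofs are below) =====
def Claim_equal_plaintext_score : Prop := ∀ (plaintext : String), Dom_plaintext_score plaintext → Spec_plaintext_score plaintext (plaintext_score plaintext)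

-- ===== LEMMAS AND PROOFS =====

/-- per-character weight -/
def pvW (c : Char) : Int :=
  if c = ' ' then 10
  else if pvAsciiLetters.contains c then 3
  else if pvDigits.contains c then 1
  else 0

lemma foldl_add_eq {α : Type} (g : α → Int) : ∀ (l : List α) (i : Int),
    l.foldl (fun s a => s + g a) i = i + (l.map g).sum := by
  intro l
  induction l with
  | nil => simp
  | cons x xs ih => intro i; simp [List.foldl, ih]; ring

lemma sum_if_single (x : Char) (v : Int) : ∀ (ks : List Char), ks.Nodup → x ∈ ks →
    (ks.map (fun k => if k = x then v else 0)).sum = v := by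
  intro ks
  induction ks with
  | nil => simp
  | cons k ks ih =>
    intro hnd hmem
    rcases List.mem_cons.mp hmem with h | h
    · subst h
      have hnot : x ∉ ks := (List.nodup_cons.mp hnd).1
      simp only [List.map, List.sum_cons]
      have : (ks.map (fun k => if k = x then v else 0)).sum = 0 := by
        apply List.sum_eq_zero
        intro y hy
        obtain ⟨k', hk', rfl⟩ := List.mem_map.mp hy
        simp only [ite_eq_right_iff]
        intro hkx; exact absurd (hkx ▸ hk') hnot
      simp [this]
    · have hne : k ≠ x := fun he => (List.nodup_cons.mp hnd).1 (he ▸ h)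
      simp only [List.map, List.sum_cons, if_neg hne]
      rw [ih (List.nodup_cons.mp hnd).2 h]; ring

lemma sum_weighted_counts (xs : List Char) : ∀ (ks : List Char), ks.Nodup → (∀ x ∈ xs, x ∈ ks) →
    (ks.map (fun k => pvW k * (xs.count k : Int))).sum = (xs.map pvW).sum := by
  induction xs with
  | nil => intro ks _ _; simp
  | cons x xs ih =>
    intro ks hnd hmem
    have hx : x ∈ ks := hmem x (List.mem_cons_self ..)
    have h1 : ∀ k, pvW k * (((x :: xs).count k : Nat) : Int)
        = pvW k * (xs.count k : Int) + (if k = x then pvW x else 0) := by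
      intro k
      rw [List.count_cons]
      by_cases h : k = x
      · subst h; simp; ring
      · simp [h]; exact Or.inl (fun he => h he.symm)
    calc (ks.map (fun k => pvW k * ((x :: xs).count k : Int))).sum
        = (ks.map (fun k => pvW k * (xs.count k : Int) + (if k = x then pvW x else 0))).sum := by
          congr 1; exact List.map_congr_left (fun k _ => h1 k)
      _ = (ks.map (fun k => pvW k * (xs.count k : Int))).sum
          + (ks.map (fun k => if k = x then pvW x else 0)).sum := by
          rw [← List.sum_map_add]
      _ = (xs.map pvW).sum + pvW x := by
          rw [ih ks hnd (fun y hy => hmem y (List.mem_cons_of_mem _ hy)),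
              sum_if_single x (pvW x) ks hnd hx]
      _ = ((x :: xs).map pvW).sum := by simp [List.map, List.sum_cons]; ring

lemma plaintext_score_eq_sum (plaintext : String) :
    plaintext_score plaintext = (plaintext.toList.map pvW).sum := by
  unfold plaintext_score
  have hf : (fun (score : Int) (char : Char) =>
      if char = ' ' then score + 10
      else if pvAsciiLetters.contains char then score + 3
      else if pvDigits.contains char then score + 1
      else score) = fun s c => s + pvW c := by
    funext s c
    unfold pvW
    split_ifs <;> simp
  rw [hf, foldl_add_eq]
  simp

lemma plaintext_score_alt_eq_sum (plaintext : String) :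
    plaintext_score_alt plaintext = (plaintext.toList.map pvW).sum := by
  simp only [plaintext_score_alt, PySem.Dict.foldl_insert_getD_add_one_eq_counter,
    PySem.Dict.items_counter]
  have hf : (fun (score : Int) (p : Char × Int) =>
      if p.1 = ' ' then score + 10 * p.2
      else if pvAsciiLetters.contains p.1 then score + 3 * p.2
      else if pvDigits.contains p.1 then score + 1 * p.2
      else score) = fun s p => s + pvW p.1 * p.2 := by
    funext s p
    unfold pvW
    split_ifs <;> ring
  rw [hf, foldl_add_eq]
  simp only [List.map_map, zero_add]
  have : ((PySem.Set.ofList plaintext.toList).map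
      ((fun p : Char × Int => pvW p.1 * p.2) ∘ fun k => (k, (plaintext.toList.count k : Int)))).sum
      = ((PySem.Set.ofList plaintext.toList).map (fun k => pvW k * (plaintext.toList.count k : Int))).sum := rfl
  rw [this, sum_weighted_counts plaintext.toList (PySem.Set.ofList plaintext.toList)
    (PySem.Set.nodup_ofList _) (fun x hx => (PySem.Set.mem_ofList ..).mpr hx)]

-- ===== VERDICT (by name: the statement is the Claim_ definition above) =====
theorem plaintext_score_spec : Claim_equal_plaintext_score := by
  intro plaintext _
  unfold Spec_plaintext_score
  rw [plaintext_score_eq_sum, plaintext_score_alt_eq_sum]
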